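-- pv_equiv track=rewrite | github.com/jasonyandell/advent-of-code-2024 | day_06.py | parse
-- ===== SOURCE A (Python) =====
-- def parse(lines):
--     blocks = set()
--     guard_pos = (-1,-1)
--     bounds = (0,0)
--     for row in range(len(lines)):
--         for col in range(len(lines[row])):
--             bounds = (max(bounds[0], row), max(bounds[1], col))
--             if lines[row][col] == '#':
--                 blocks.add((row,col))
--             if lines[row][col] == '^':
--                 guard_pos = (row, col)
--     return bounds, guard_pos, blocks
-- ===== SOURCE B (Python) =====
-- def parse(lines):
--     cells = [(r, c, ch) for r, row in enumerate(lines) for c, ch in enumerate(row)]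
--     blocks = {(r, c) for r, c, ch in cells if ch == '#'}
--     guard_pos = next(((r, c) for r, c, ch in reversed(cells) if ch == '^'), (-1, -1))
--     bounds = (max((r for r, _, _ in cells), default=0),
--               max((c for _, c, _ in cells), default=0))
--     return bounds, guard_pos, blocks
-- ===== Notes on version B (the rewrite author's own statement) =====
-- stated objective: simpler
-- what changed: A's single interleaved nested index loop carrying four pieces of mutable state is replaced by one flattening pass producing a cell list (row, col, char), from which each result is an independent reduction: a set comprehension for blocks, a first-match search over the reversed cell list for the guard, and two max(..., default=0) reductions over cell coordinates for the bounds.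
import Mathlib
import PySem

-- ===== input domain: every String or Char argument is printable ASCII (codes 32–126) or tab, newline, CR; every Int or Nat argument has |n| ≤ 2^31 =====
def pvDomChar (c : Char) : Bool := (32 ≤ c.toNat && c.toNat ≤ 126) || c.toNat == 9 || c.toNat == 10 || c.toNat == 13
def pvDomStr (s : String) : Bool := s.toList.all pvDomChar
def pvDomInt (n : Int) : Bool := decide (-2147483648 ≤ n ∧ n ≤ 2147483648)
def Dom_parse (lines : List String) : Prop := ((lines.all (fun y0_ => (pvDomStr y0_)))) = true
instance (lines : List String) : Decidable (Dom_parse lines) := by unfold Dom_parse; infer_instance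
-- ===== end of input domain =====

-- B replaces A's single interleaved nested loop carrying four pieces of state by one
-- flattening pass into a (row, col, char) cell list, from which blocks, the guard (first
-- match over the reversed cells) and the bounds (two max reductions over cell coordinates)
-- are each one independent reduction; objective: simpler.

-- ===== PORT A =====
def parse (lines : List String) : (Int × Int) × (Int × Int) × (List (Int × Int)) :=
  (PySem.List.pyRange 0 (PySem.List.len lines)).foldl
    (fun st row =>
      let s := PySem.List.pyGetD lines row ""
      (PySem.List.pyRange 0 (PySem.Str.len s)).foldl
        (fun st col =>
          let ch := PySem.List.pyGetD s.toList col ' '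
          let bounds := (max st.1.1 row, max st.1.2 col)
          let blocks := if ch = '#' then PySem.Set.add st.2.2 (row, col) else st.2.2
          let guard_pos := if ch = '^' then (row, col) else st.2.1
          (bounds, guard_pos, blocks))
        st)
    ((0, 0), (-1, -1), PySem.Set.empty)

-- ===== PORT B =====
def parse_alt (lines : List String) : (Int × Int) × (Int × Int) × (List (Int × Int)) :=
  let cells := (PySem.List.enumerate lines).flatMap
      (fun p => (PySem.List.enumerate p.2.toList).map (fun q => (p.1, q.1, q.2)))
  let blocks := PySem.Set.ofList
      ((cells.filter (fun t => t.2.2 = '#')).map (fun t => (t.1, t.2.1)))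
  let guard_pos := ((cells.reverse.filter (fun t => t.2.2 = '^')).map (fun t => (t.1, t.2.1))).headD (-1, -1)
  let bounds := (PySem.List.maxD (cells.map (fun t => t.1)) (fun x => x) 0,
                 PySem.List.maxD (cells.map (fun t => t.2.1)) (fun x => x) 0)
  (bounds, guard_pos, blocks)

-- ===== PRECONDITION & SPEC =====
def Spec_parse (lines : List String) (out : (Int × Int) × (Int × Int) × (List (Int × Int))) : Prop := out = parse_alt lines
instance (lines : List String) (out : (Int × Int) × (Int × Int) × (List (Int × Int))) : Decidable (Spec_parse lines out) := by unfold Spec_parse; infer_instance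

-- ===== CLAIM (what is proved, stated in full; the proofs are below) =====
def Claim_equal_parse : Prop := ∀ (lines : List String), Dom_parse lines → Spec_parse lines (parse lines)

-- ===== LEMMAS AND PROOFS =====

-- A's per-character step, and its per-row fold
def pvG (r : Int) (st : (Int × Int) × (Int × Int) × List (Int × Int)) (q : Int × Char) :
    (Int × Int) × (Int × Int) × List (Int × Int) :=
  ((max st.1.1 r, max st.1.2 q.1),
   (if q.2 = '^' then (r, q.1) else st.2.1),
   (if q.2 = '#' then PySem.Set.add st.2.2 (r, q.1) else st.2.2))

def pvF (st : (Int × Int) × (Int × Int) × List (Int × Int)) (p : Int × String) :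
    (Int × Int) × (Int × Int) × List (Int × Int) :=
  (PySem.List.enumerate p.2.toList).foldl (pvG p.1) st

def pvCarets (p : Int × String) : List (Int × Int) :=
  ((PySem.List.enumerate p.2.toList).filter (fun q => q.2 = '^')).map (fun q => (p.1, q.1))

def pvBlocks (p : Int × String) : List (Int × Int) :=
  ((PySem.List.enumerate p.2.toList).filter (fun q => q.2 = '#')).map (fun q => (p.1, q.1))

def pvCells (L : List (Int × String)) : List (Int × Int × Char) :=
  L.flatMap (fun p => (PySem.List.enumerate p.2.toList).map (fun q => (p.1, q.1, q.2)))

-- A is the fold of pvF over enumerate(lines)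
theorem parse_eq_fold (lines : List String) :
    parse lines = (PySem.List.enumerate lines).foldl pvF ((0, 0), (-1, -1), []) := by
  unfold parse
  rw [PySem.List.enumerate_eq_map_pyRange lines "", List.foldl_map]
  congr 1
  funext st row
  unfold pvF
  rw [PySem.List.enumerate_eq_map_pyRange (PySem.List.pyGetD lines row "").toList ' ',
      List.foldl_map]
  simp only [PySem.Str.len_eq, PySem.List.len_eq]
  rfl

-- the fold of pvG splits into four independent folds
theorem pvG_foldl (r : Int) (l : List (Int × Char)) (a b : Int) (c : Int × Int)
    (d : List (Int × Int)) :
    l.foldl (pvG r) ((a, b), c, d)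
      = ((l.foldl (fun v (_ : Int × Char) => max v r) a,
          l.foldl (fun v (q : Int × Char) => max v q.1) b),
         l.foldl (fun g (q : Int × Char) => if q.2 = '^' then (r, q.1) else g) c,
         l.foldl (fun bl (q : Int × Char) => if q.2 = '#' then PySem.Set.add bl (r, q.1) else bl) d) := by
  induction l generalizing a b c d with
  | nil => rfl
  | cons x t ih => simp only [List.foldl_cons, pvG]; exact ih _ _ _ _

theorem pvRowMax1 (r : Int) (l : List Char) (s b : Int) :
    (PySem.List.enumerate l s).foldl (fun v (_ : Int × Char) => max v r) b
      = if l = [] then b else max b r := by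
  induction l generalizing s b with
  | nil => rfl
  | cons x t ih =>
    rw [PySem.List.enumerate_cons, List.foldl_cons, ih]
    by_cases h : t = [] <;> simp [h]

theorem pvRowMax2 (l : List Char) (s b : Int) :
    (PySem.List.enumerate l s).foldl (fun v (q : Int × Char) => max v q.1) b
      = if l = [] then b else max b (s + l.length - 1) := by
  induction l generalizing s b with
  | nil => rfl
  | cons x t ih =>
    rw [PySem.List.enumerate_cons, List.foldl_cons, ih]
    by_cases h : t = []
    · simp [h]
    · simp [h]; omega

-- a conditional accumulation is a fold over the filtered-and-mapped list
theorem pvFoldlFilterMap {A B I : Type} (P : I → Prop) [DecidablePred P] (f : I → B)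
    (h : A → B → A) (l : List I) (b : A) :
    l.foldl (fun acc q => if P q then h acc (f q) else acc) b
      = ((l.filter (fun q => decide (P q))).map f).foldl h b := by
  induction l generalizing b with
  | nil => rfl
  | cons x t ih => by_cases hx : P x <;> simp [hx, ih]

theorem pvFoldlLast {B : Type} (l : List B) (d : B) :
    l.foldl (fun _ x => x) d = l.getLastD d := by
  induction l generalizing d with
  | nil => rfl
  | cons x t ih => simp only [List.foldl_cons]; rw [ih, List.getLastD_cons]

theorem pvFoldlFlatMap {A B I : Type} (g : I → List B) (h : A → B → A) (l : List I) (b : A) :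
    l.foldl (fun acc p => (g p).foldl h acc) b = (l.flatMap g).foldl h b := by
  induction l generalizing b with
  | nil => rfl
  | cons x t ih => simp [List.foldl_cons, List.flatMap_cons, List.foldl_append, ih]

-- one row's effect, component by component
theorem pvF_eq (st : (Int × Int) × (Int × Int) × List (Int × Int)) (p : Int × String) :
    pvF st p
      = ((if p.2.toList = [] then st.1.1 else max st.1.1 p.1,
          if p.2.toList = [] then st.1.2 else max st.1.2 ((p.2.toList.length : Int) - 1)),
         (pvCarets p).foldl (fun _ x => x) st.2.1,
         (pvBlocks p).foldl PySem.Set.add st.2.2) := by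
  obtain ⟨⟨a, b⟩, c, d⟩ := st
  unfold pvF pvCarets pvBlocks
  rw [pvG_foldl, pvRowMax1, pvRowMax2,
      pvFoldlFilterMap (fun q : Int × Char => q.2 = '^') (fun q => (p.1, q.1)) (fun _ x => x),
      pvFoldlFilterMap (fun q : Int × Char => q.2 = '#') (fun q => (p.1, q.1)) PySem.Set.add]
  by_cases h : p.2.toList = [] <;> simp [h]

theorem pvOuterSplit (l : List (Int × String)) (a b : Int) (c : Int × Int)
    (d : List (Int × Int)) :
    l.foldl pvF ((a, b), c, d)
      = ((l.foldl (fun v p => if p.2.toList = [] then v else max v p.1) a,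
          l.foldl (fun v p => if p.2.toList = [] then v else max v ((p.2.toList.length : Int) - 1)) b),
         l.foldl (fun g p => (pvCarets p).foldl (fun _ x => x) g) c,
         l.foldl (fun bl p => (pvBlocks p).foldl PySem.Set.add bl) d) := by
  induction l generalizing a b c d with
  | nil => rfl
  | cons x t ih => rw [List.foldl_cons, pvF_eq]; simp only [List.foldl_cons]; exact ih _ _ _ _

-- max(xs, default=0) is the running-max loop when all entries are non-negative
theorem pvMaxD (L : List Int) (hL : ∀ x ∈ L, 0 ≤ x) :
    PySem.List.maxD L (fun x => x) 0 = L.foldl max 0 := by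
  cases L with
  | nil => rfl
  | cons x t =>
    have hx : (0 : Int) ≤ x := hL x (List.mem_cons_self ..)
    simp [PySem.List.maxD, PySem.List.max?_id_cons, List.foldl_cons, max_eq_right hx]

theorem pvRowConst (r : Int) (l : List Char) (s v : Int) :
    (((PySem.List.enumerate l s).map (fun _ => r)).foldl max v)
      = if l = [] then v else max v r := by
  induction l generalizing s v with
  | nil => rfl
  | cons x t ih =>
    rw [PySem.List.enumerate_cons, List.map_cons, List.foldl_cons, ih]
    by_cases h : t = [] <;> simp [h]

-- the filtered projection of the flattened cell list, row by row
theorem pvCellsProj (c : Char) (L : List (Int × String)) :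
    ((pvCells L).filter (fun t => t.2.2 = c)).map (fun t => (t.1, t.2.1))
      = L.flatMap (fun p =>
          ((PySem.List.enumerate p.2.toList).filter (fun q => q.2 = c)).map (fun q => (p.1, q.1))) := by
  induction L with
  | nil => rfl
  | cons x t ih =>
    unfold pvCells at *
    simp only [List.flatMap_cons, List.filter_append, List.map_append, ih]
    congr 1
    rw [List.filter_map, List.map_map]
    rfl

theorem pvHeadDRev {B : Type} (l : List B) (d : B) :
    l.reverse.headD d = l.getLastD d := by
  rw [List.headD_eq_head?_getD, List.head?_reverse, List.getLastD_eq_getLast?]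

-- ===== VERDICT (by name: the statement is the Claim_ definition above) =====
theorem parse_spec : Claim_equal_parse := by
  unfold Claim_equal_parse
  intro lines _
  unfold Spec_parse
  rw [parse_eq_fold, pvOuterSplit]
  simp only [parse_alt]
  rw [show (List.flatMap (fun p => List.map (fun q => (p.1, q.1, q.2)) (PySem.List.enumerate p.2.toList))
        (PySem.List.enumerate lines)) = pvCells (PySem.List.enumerate lines) from rfl]
  congr 1
  · -- bounds
    congr 1
    · -- row bound
      have hmap : (pvCells (PySem.List.enumerate lines)).map (fun t => t.1)
          = (PySem.List.enumerate lines).flatMap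
              (fun p => (PySem.List.enumerate p.2.toList).map (fun _ => p.1)) := by
        unfold pvCells
        rw [List.map_flatMap]
        simp only [List.map_map]
        rfl
      have hnn : ∀ x ∈ (pvCells (PySem.List.enumerate lines)).map (fun t => t.1), (0:Int) ≤ x := by
        intro x hx
        rw [hmap] at hx
        obtain ⟨p, hp, hx'⟩ := List.mem_flatMap.1 hx
        obtain ⟨q, _, rfl⟩ := List.mem_map.1 hx'
        rw [PySem.List.mem_enumerate_iff] at hp
        obtain ⟨k, hk, rfl⟩ := hp
        simp
      rw [pvMaxD _ hnn, hmap, ← pvFoldlFlatMap]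
      congr 1
      funext v p
      rw [pvRowConst]
    · -- column bound
      have hmap : (pvCells (PySem.List.enumerate lines)).map (fun t => t.2.1)
          = (PySem.List.enumerate lines).flatMap
              (fun p => (PySem.List.enumerate p.2.toList).map (fun q => q.1)) := by
        unfold pvCells
        rw [List.map_flatMap]
        simp only [List.map_map]
        rfl
      have hnn : ∀ x ∈ (pvCells (PySem.List.enumerate lines)).map (fun t => t.2.1), (0:Int) ≤ x := by
        intro x hx
        rw [hmap] at hx
        obtain ⟨p, hp, hx'⟩ := List.mem_flatMap.1 hx
        obtain ⟨q, hq, rfl⟩ := List.mem_map.1 hx'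
        rw [PySem.List.mem_enumerate_iff] at hq
        obtain ⟨k, hk, rfl⟩ := hq
        simp
      rw [pvMaxD _ hnn, hmap, ← pvFoldlFlatMap]
      congr 1
      funext v p
      rw [List.foldl_map, pvRowMax2]
      by_cases h : p.2.toList = [] <;> simp [h]
  congr 1
  · -- guard position
    rw [pvFoldlFlatMap pvCarets (fun _ x => x), pvFoldlLast,
        List.filter_reverse, List.map_reverse, pvHeadDRev, pvCellsProj]
    rfl
  · -- blocks
    rw [pvFoldlFlatMap pvBlocks PySem.Set.add, ← PySem.Set.ofList_eq_foldl, pvCellsProj]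
    rfl
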